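-- pv_equiv track=rewrite | github.com/Burbon13/Leetcode-problems | src/leetcode/binary_subarrays.py | __right_zeros_list
-- ===== SOURCE A (Python) =====
-- def __right_zeros_list(A):
--     right_zeros = [0 for _ in range(len(A))]
--
--     zeros = 1 if A[-1] == 0 else 0
--     index = len(A) - 2
--     while index >= 0:
--         value = A[index]
--         if value == 1:
--             right_zeros[index] = zeros
--             zeros = 0
--         else:
--             zeros += 1
--         index -= 1
--
--     return right_zeros
-- ===== SOURCE B (Python) =====
-- def __right_zeros_list(A):
--     # Forward single pass: remember the index of the last 1 seen and the count
--     # of non-1 elements since it; write the count when the next 1 arrives,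
--     # flush the trailing segment at the end (the last element counts only if 0).
--     if not A:
--         return []
--     res = [0] * len(A)
--     prev = None
--     z = 0
--     for i, v in enumerate(A[:-1]):
--         if v == 1:
--             if prev is not None:
--                 res[prev] = z
--             prev = i
--             z = 0
--         else:
--             z += 1
--     if prev is not None:
--         res[prev] = z + (1 if A[-1] == 0 else 0)
--     return res
-- ===== Notes on version B (the rewrite author's own statement) =====
-- stated objective: alternative
-- what changed: Replaces A's backward index-decrementing while loop (counting zeros right-to-left) with a single forward pass that remembers the index of the last 1 and the run length since it, writing each count when the next 1 arrives and flushing the trailing run once at the end; the single plain for-loop avoids the while-loop index arithmetic and per-step subscripting, a constant-factor gain.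
import Mathlib
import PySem

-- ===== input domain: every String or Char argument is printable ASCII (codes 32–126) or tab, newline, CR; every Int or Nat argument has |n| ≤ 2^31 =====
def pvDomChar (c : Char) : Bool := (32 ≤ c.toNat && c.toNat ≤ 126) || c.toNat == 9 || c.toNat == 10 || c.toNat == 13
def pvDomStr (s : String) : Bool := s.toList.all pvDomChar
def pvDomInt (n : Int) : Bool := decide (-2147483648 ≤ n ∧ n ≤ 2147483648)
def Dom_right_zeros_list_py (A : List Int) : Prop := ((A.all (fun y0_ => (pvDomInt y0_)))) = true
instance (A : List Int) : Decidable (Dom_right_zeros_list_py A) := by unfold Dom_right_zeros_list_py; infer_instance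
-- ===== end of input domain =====

-- B replaces A's backward index loop by a single forward pass keeping the last-1 index
-- and a run counter (alternative decomposition, same O(n) cost). Equivalence is about the
-- return value on nonempty lists; on the empty list Python A raises IndexError (excluded by Pre_).

-- ===== PORT A =====
-- while index >= 0: … ; ported as recursion on k = index + 1 (processes indices k-1, …, 0)
def pvALoop (A : List Int) : List Int → Int → Nat → List Int
  | rz, _, 0 => rz
  | rz, zeros, k + 1 =>
    let value := A.getD k 0
    if value = 1 then pvALoop A (rz.set k zeros) 0 k
    else pvALoop A rz (zeros + 1) k

def right_zeros_list_py (A : List Int) : List Int :=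
  let rz := List.replicate A.length (0 : Int)
  -- last-element access: Python raises IndexError on the empty list; the port defaults (empty input is outside Pre_)
  let zeros : Int := if (PySem.List.pyGet? A (-1)).getD 0 = 0 then 1 else 0
  pvALoop A rz zeros (A.length - 1)

-- ===== PORT B =====
-- loop body of 'for i, v in enumerate(A[:-1])'
def pvBStep (st : List Int × Option Int × Int) (p : Int × Int) : List Int × Option Int × Int :=
  match st, p with
  | (res, prev, z), (i, v) =>
    if v = 1 then
      ((match prev with
        | some p' => res.set p'.toNat z
        | none => res), some i, 0)
    else (res, prev, z + 1)

-- final 'if prev is not None: res[prev] = z + extra'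
def pvBFlush (st : List Int × Option Int × Int) (extra : Int) : List Int :=
  match st with
  | (res, some p', z) => res.set p'.toNat (z + extra)
  | (res, none, _) => res

def right_zeros_list_py_alt (A : List Int) : List Int :=
  match A.getLast? with
  | none => []
  | some last =>
    let st := (PySem.List.enumerate A.dropLast 0).foldl pvBStep
                (List.replicate A.length (0 : Int), (none : Option Int), (0 : Int))
    pvBFlush st (if last = 0 then 1 else 0)

-- ===== PRECONDITION & SPEC =====
-- Pre_ excludes only the empty list, on which Python A raises IndexError at its first last-element access.
def Pre_right_zeros_list_py (A : List Int) : Prop := A ≠ []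
instance (A : List Int) : Decidable (Pre_right_zeros_list_py A) := by unfold Pre_right_zeros_list_py; infer_instance
def pvWitness_right_zeros_list_py : List Int := [1, 0, 0, 1]

def Spec_right_zeros_list_py (A : List Int) (out : List Int) : Prop := out = right_zeros_list_py_alt A
instance (A : List Int) (out : List Int) : Decidable (Spec_right_zeros_list_py A out) := by unfold Spec_right_zeros_list_py; infer_instance

-- ===== CLAIM (what is proved, stated in full; the proofs are below) =====
def Claim_equal_right_zeros_list_py : Prop := ∀ (A : List Int), Dom_right_zeros_list_py A → Pre_right_zeros_list_py A → Spec_right_zeros_list_py A (right_zeros_list_py A)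
-- ===== LEMMAS AND PROOFS =====

-- common right-to-left specification: pvG l z = (per-index result for l, zeros count after l)
def pvG : List Int → Int → List Int × Int
  | [], z => ([], z)
  | v :: t, z =>
    let r := pvG t z
    if v = 1 then (r.2 :: r.1, 0) else ((0 : Int) :: r.1, r.2 + 1)

theorem pvG_length (l : List Int) (z : Int) : (pvG l z).1.length = l.length := by
  induction l generalizing z with
  | nil => rfl
  | cons v t ih => simp only [pvG]; split <;> simp [ih]

theorem pvG_append (l1 l2 : List Int) (z : Int) :
    pvG (l1 ++ l2) z = ((pvG l1 (pvG l2 z).2).1 ++ (pvG l2 z).1, (pvG l1 (pvG l2 z).2).2) := by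
  induction l1 with
  | nil => simp [pvG]
  | cons v t ih => simp only [List.cons_append, pvG, ih]; split <;> simp

theorem set_at_append {α : Type} (p : List α) (x : α) (t : List α) (v : α) :
    (p ++ x :: t).set p.length v = p ++ v :: t := by
  induction p with
  | nil => rfl
  | cons a q ih => simp [List.set, ih]

theorem pvALoop_eq (A : List Int) (k : Nat) (hk : k ≤ A.length) (zeros : Int) (tail : List Int) :
    pvALoop A (List.replicate k (0 : Int) ++ tail) zeros k = (pvG (A.take k) zeros).1 ++ tail := by
  induction k generalizing zeros tail with
  | zero => simp [pvALoop, pvG]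
  | succ k ih =>
    have hkA : k < A.length := hk
    have htake : A.take (k + 1) = A.take k ++ [A.getD k 0] := by
      rw [List.take_succ]
      simp [List.getElem?_eq_getElem hkA, List.getD]
    have hrep : List.replicate (k + 1) (0 : Int) ++ tail
        = List.replicate k (0 : Int) ++ ((0 : Int) :: tail) := by
      simp [List.replicate_succ']
    by_cases hv : A.getD k 0 = 1
    · have hset : (List.replicate (k + 1) (0 : Int) ++ tail).set k zeros
          = List.replicate k (0 : Int) ++ (zeros :: tail) := by
        rw [hrep]
        have := set_at_append (List.replicate k (0 : Int)) (0 : Int) tail zeros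
        simpa using this
      have hv' : A[k]?.getD 0 = 1 := by simpa [List.getD] using hv
      simp only [pvALoop, hv, if_pos rfl, hset]
      rw [ih (Nat.le_of_lt hkA), htake, pvG_append]
      simp [pvG, hv']
    · have hv' : ¬ A[k]?.getD 0 = 1 := by simpa [List.getD] using hv
      simp only [pvALoop, if_neg hv]
      rw [hrep, ih (Nat.le_of_lt hkA), htake, pvG_append]
      simp [pvG, hv']

theorem enumerate_append (xs ys : List Int) (s : Int) :
    PySem.List.enumerate (xs ++ ys) s
      = PySem.List.enumerate xs s ++ PySem.List.enumerate ys (s + xs.length) := by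
  induction xs generalizing s with
  | nil => simp [PySem.List.enumerate_nil]
  | cons a t ih =>
    simp [PySem.List.enumerate_cons, ih]
    ring_nf

theorem set_pvG (xs : List Int) (w z' : Int) (t : List Int) :
    (((pvG xs w).1) ++ (0 : Int) :: t).set xs.length z' = (pvG xs w).1 ++ z' :: t := by
  have h := set_at_append (pvG xs w).1 (0 : Int) t z'
  rwa [pvG_length] at h

theorem pvG_snoc_one (xs : List Int) (z' : Int) :
    pvG (xs ++ [1]) z' = ((pvG xs 0).1 ++ [z'], (pvG xs 0).2) := by
  rw [pvG_append]; simp [pvG]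

theorem pvG_snoc_ne (xs : List Int) (v z' : Int) (hv : v ≠ 1) :
    pvG (xs ++ [v]) z' = ((pvG xs (z' + 1)).1 ++ [0], (pvG xs (z' + 1)).2) := by
  rw [pvG_append]; simp [pvG, hv]

theorem pvBLoop_eq (xs : List Int) (m : Nat) : ∀ z' : Int, xs.length ≤ m →
    pvBFlush ((PySem.List.enumerate xs 0).foldl pvBStep
        (List.replicate m (0 : Int), (none : Option Int), (0 : Int))) z'
      = (pvG xs z').1 ++ List.replicate (m - xs.length) (0 : Int) := by
  induction xs using List.reverseRecOn with
  | nil => intro z' _; simp [PySem.List.enumerate_nil, pvBFlush, pvG]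
  | append_singleton xs v ih =>
    intro z' hm
    have hlt : xs.length < m := by simp at hm; omega
    have henum : PySem.List.enumerate (xs ++ [v]) 0
        = PySem.List.enumerate xs 0 ++ [((xs.length : Int), v)] := by
      rw [enumerate_append]; simp [PySem.List.enumerate_cons, PySem.List.enumerate_nil]
    rw [henum, List.foldl_append]
    obtain ⟨res, prev, z, hres⟩ :
        ∃ res prev z, (PySem.List.enumerate xs 0).foldl pvBStep
          (List.replicate m (0 : Int), (none : Option Int), (0 : Int)) = (res, prev, z) :=
      ⟨_, _, _, rfl⟩
    have ihz : ∀ w : Int, pvBFlush (res, prev, z) w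
        = (pvG xs w).1 ++ List.replicate (m - xs.length) (0 : Int) := by
      intro w; rw [← hres]; exact ih w (le_of_lt hlt)
    rw [hres]
    have hrep : List.replicate (m - xs.length) (0 : Int)
        = (0 : Int) :: List.replicate (m - (xs.length + 1)) (0 : Int) := by
      rw [← List.replicate_succ]; congr 1; omega
    simp only [List.foldl_cons, List.foldl_nil, List.length_append, List.length_singleton]
    by_cases hv : v = 1
    · subst hv
      cases prev with
      | none =>
        have h0 := ihz 0
        simp only [pvBFlush] at h0
        simp only [pvBStep, pvBFlush, reduceIte, Int.toNat_natCast]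
        rw [h0, hrep, set_pvG, pvG_snoc_one]
        simp
      | some p' =>
        have h0 := ihz 0
        simp only [pvBFlush, add_zero] at h0
        simp only [pvBStep, pvBFlush, reduceIte, Int.toNat_natCast]
        rw [h0, hrep, set_pvG, pvG_snoc_one]
        simp
    · cases prev with
      | none =>
        have h1 := ihz (z' + 1)
        simp only [pvBFlush] at h1
        simp only [pvBStep, if_neg hv, pvBFlush]
        rw [h1, hrep, pvG_snoc_ne xs v z' hv]
        simp
      | some p' =>
        have h1 := ihz (z' + 1)
        simp only [pvBFlush] at h1
        simp only [pvBStep, if_neg hv, pvBFlush]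
        have harith : z + 1 + z' = z + (z' + 1) := by ring
        rw [harith, h1, hrep, pvG_snoc_ne xs v z' hv]
        simp

-- ===== VERDICT (by name: the statement is the Claim_ definition above) =====
theorem right_zeros_list_py_spec : Claim_equal_right_zeros_list_py := by
  intro A _ hpre
  unfold Spec_right_zeros_list_py
  obtain ⟨xs, a, hA⟩ : ∃ xs a, A = xs ++ [a] := by
    rcases A.eq_nil_or_concat with h | ⟨xs, a, h⟩
    · exact absurd h hpre
    · exact ⟨xs, a, by simpa using h⟩
  subst hA
  have hlast : (xs ++ [a]).getLast? = some a := by simp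
  have hget : PySem.List.pyGet? (xs ++ [a]) (-1) = some a :=
    PySem.List.pyGet?_neg_one_append_singleton xs a
  have hdl : (xs ++ [a]).dropLast = xs := by simp
  have hlen : (xs ++ [a]).length = xs.length + 1 := by simp
  unfold right_zeros_list_py right_zeros_list_py_alt
  rw [hlast, hget, hdl, hlen]
  simp only [Option.getD_some, Nat.add_sub_cancel]
  rw [pvBLoop_eq xs (xs.length + 1) _ (by omega)]
  have hrz : List.replicate (xs.length + 1) (0 : Int)
      = List.replicate xs.length (0 : Int) ++ [(0 : Int)] := by
    simp [List.replicate_succ']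
  rw [hrz, pvALoop_eq (xs ++ [a]) xs.length (by simp) _ [0]]
  rw [List.take_left]
  have h1 : xs.length + 1 - xs.length = 1 := by omega
  rw [h1, List.replicate_one]
  exact rfl
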